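-- pv_equiv track=rewrite | github.com/SectumPsempra/ctci | arrays/level_3/given-an-array-arr-find-the-maximum-j-i-such-that-arrj-arri.py | find_max_sum_difference
-- ===== SOURCE A (Python) =====
-- def find_max_sum_difference(arr):
--     """Given an array arr, find the maximum j-i where j and i are two indexes
--     of the array arr such that arr[j] > arr[i].
--     params:
--     ---------------
--     arr: array
--
--     returns:
--     ---------------
--     number, max(j-i), where i != j
--     """
--     n = len(arr)
--     store = -1234232123
--     for i in range(n):
--         for j in range(i+1, n):
--             if arr[j] > arr[i] and (j-i)>store:
--                 store = j-i
--     return store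
-- ===== SOURCE B (Python) =====
-- def find_max_sum_difference(arr):
--     n = len(arr)
--     for d in range(n - 1, 0, -1):
--         if any(arr[i + d] > arr[i] for i in range(n - d)):
--             return d
--     return -1234232123
-- ===== Notes on version B (the rewrite author's own statement) =====
-- stated objective: faster
-- what changed: B scans candidate index gaps d from n-1 downward and returns at the first gap for which some i has arr[i+d]>arr[i], instead of A's nested loop taking the max of j-i over all pairs.
import Mathlib
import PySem

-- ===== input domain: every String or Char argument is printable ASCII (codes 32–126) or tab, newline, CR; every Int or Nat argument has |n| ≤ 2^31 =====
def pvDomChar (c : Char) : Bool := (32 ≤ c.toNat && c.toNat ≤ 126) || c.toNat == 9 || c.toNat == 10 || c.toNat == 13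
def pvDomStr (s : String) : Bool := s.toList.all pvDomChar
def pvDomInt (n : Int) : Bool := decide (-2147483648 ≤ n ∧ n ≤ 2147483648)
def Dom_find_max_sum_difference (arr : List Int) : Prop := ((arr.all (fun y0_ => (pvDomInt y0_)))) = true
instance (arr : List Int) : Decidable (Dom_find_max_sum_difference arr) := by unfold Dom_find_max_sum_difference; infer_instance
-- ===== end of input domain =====

-- B replaces A's O(n^2) max-over-all-pairs scan by a descending scan over gap sizes with early
-- exit at the first feasible gap (objective: faster, measured; same O(n^2) worst case).


-- ===== PORT A =====
-- literal transliteration of A's nested for-loops over range(n) / range(i+1, n)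
def find_max_sum_difference (arr : List Int) : Int :=
  let n : Int := arr.length
  (PySem.List.pyRange 0 n 1).foldl (fun store i =>
    (PySem.List.pyRange (i + 1) n 1).foldl (fun store j =>
      if PySem.List.pyGetD arr j 0 > PySem.List.pyGetD arr i 0 ∧ j - i > store then j - i
      else store) store) (-1234232123)

-- ===== PORT B =====
-- `any(arr[i + d] > arr[i] for i in range(n - d))` (indices always in range)
def pvCheck (arr : List Int) (d : Nat) : Bool :=
  (List.range (arr.length - d)).any (fun i => arr.getD (i + d) 0 > arr.getD i 0)

-- the `for d in range(n - 1, 0, -1): … return d` loop, as a countdown recursion on d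
def pvGoB (arr : List Int) : Nat → Int
  | 0 => -1234232123
  | d + 1 => if pvCheck arr (d + 1) then ((d : Int) + 1) else pvGoB arr d

def find_max_sum_difference_alt (arr : List Int) : Int :=
  pvGoB arr (arr.length - 1)

-- ===== PRECONDITION & SPEC =====
def Spec_find_max_sum_difference (arr : List Int) (out : Int) : Prop := out = find_max_sum_difference_alt arr
instance (arr : List Int) (out : Int) : Decidable (Spec_find_max_sum_difference arr out) := by unfold Spec_find_max_sum_difference; infer_instance

-- ===== CLAIM (what is proved, stated in full; the proofs are below) =====
def Claim_equal_find_max_sum_difference : Prop := ∀ (arr : List Int), Dom_find_max_sum_difference arr → Spec_find_max_sum_difference arr (find_max_sum_difference arr)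

-- ===== LEMMAS AND PROOFS =====

-- A's inner loop `if c j ∧ f j > store then f j else store` is a running max of the filtered values
theorem pv_fold_char {α : Type} (c : α → Prop) [DecidablePred c] (f : α → Int) :
    ∀ (L : List α) (s0 : Int),
      L.foldl (fun s x => if c x ∧ f x > s then f x else s) s0
        = (L.filterMap (fun x => if c x then some (f x) else none)).foldl max s0 := by
  intro L
  induction L with
  | nil => intro s0; rfl
  | cons x L ih =>
    intro s0
    by_cases hc : c x
    · have h1 : (if c x ∧ f x > s0 then f x else s0) = max s0 (f x) := by
        rcases max_cases s0 (f x) with ⟨he, hle⟩ | ⟨he, hlt⟩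
        · rw [he, if_neg]; rintro ⟨-, h⟩; omega
        · rw [he, if_pos ⟨hc, hlt⟩]
      simp only [List.foldl_cons, h1, ih]
      simp [hc]
    · have h1 : (if c x ∧ f x > s0 then f x else s0) = s0 := by
        rw [if_neg]; rintro ⟨h, -⟩; exact hc h
      simp only [List.foldl_cons, h1, ih]
      simp [hc]

theorem pv_foldl_flatten (F : Int → List Int) :
    ∀ (L : List Int) (s0 : Int),
      L.foldl (fun s i => (F i).foldl max s) s0 = (L.map F).flatten.foldl max s0 := by
  intro L
  induction L with
  | nil => intro s0; rfl
  | cons x L ih => intro s0; simp [List.foldl_append, ih]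

theorem pv_le_foldl_max : ∀ (L : List Int) (s0 : Int), s0 ≤ L.foldl max s0 := by
  intro L
  induction L with
  | nil => intro s0; simp
  | cons x L ih =>
    intro s0
    calc s0 ≤ max s0 x := le_max_left _ _
      _ ≤ _ := ih _

theorem pv_mem_le_foldl_max : ∀ (L : List Int) (s0 x : Int), x ∈ L → x ≤ L.foldl max s0 := by
  intro L
  induction L with
  | nil => intro s0 x h; simp at h
  | cons y L ih =>
    intro s0 x h
    rcases List.mem_cons.mp h with h | h
    · subst h
      calc x ≤ max s0 x := le_max_right _ _
        _ ≤ _ := pv_le_foldl_max _ _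
    · exact ih _ _ h

theorem pv_foldl_max_cases : ∀ (L : List Int) (s0 : Int),
    L.foldl max s0 = s0 ∨ L.foldl max s0 ∈ L := by
  intro L
  induction L with
  | nil => intro s0; left; rfl
  | cons x L ih =>
    intro s0
    rcases ih (max s0 x) with h | h
    · rcases max_cases s0 x with ⟨he, _⟩ | ⟨he, _⟩
      · left; simpa [he] using h
      · right; rw [List.foldl_cons, h, he]; simp
    · right; exact List.mem_cons_of_mem _ h

-- the list of gaps j - i of all valid pairs, in A's traversal order
def pvML (arr : List Int) : List Int :=
  ((PySem.List.pyRange 0 (arr.length) 1).map (fun i =>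
    (PySem.List.pyRange (i + 1) (arr.length) 1).filterMap (fun j =>
      if PySem.List.pyGetD arr j 0 > PySem.List.pyGetD arr i 0 then some (j - i) else none))).flatten

theorem pv_A_eq (arr : List Int) :
    find_max_sum_difference arr = (pvML arr).foldl max (-1234232123) := by
  have h0 : find_max_sum_difference arr =
      (PySem.List.pyRange 0 (arr.length) 1).foldl (fun store i =>
        (PySem.List.pyRange (i + 1) (arr.length) 1).foldl (fun store j =>
          if PySem.List.pyGetD arr j 0 > PySem.List.pyGetD arr i 0 ∧ j - i > store then j - i
          else store) store) (-1234232123) := rfl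
  rw [h0]
  unfold pvML
  rw [← pv_foldl_flatten]
  congr 1
  funext s i
  exact pv_fold_char (fun j => PySem.List.pyGetD arr j 0 > PySem.List.pyGetD arr i 0)
    (fun j => j - i) _ s

theorem pv_mem_ML (arr : List Int) (x : Int) :
    x ∈ pvML arr ↔ ∃ i j : Nat, i < j ∧ j < arr.length ∧
      arr.getD j 0 > arr.getD i 0 ∧ x = (j : Int) - (i : Int) := by
  unfold pvML
  constructor
  · intro hx
    rw [List.mem_flatten] at hx
    obtain ⟨l, hl, hxl⟩ := hx
    rw [List.mem_map] at hl
    obtain ⟨i, hi, rfl⟩ := hl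
    rw [PySem.List.mem_pyRange_one] at hi
    obtain ⟨hi0, hin⟩ := hi
    rw [List.mem_filterMap] at hxl
    obtain ⟨j, hj, hx⟩ := hxl
    rw [PySem.List.mem_pyRange_one] at hj
    obtain ⟨hij, hjn⟩ := hj
    have hj0 : (0 : Int) ≤ j := by omega
    split_ifs at hx with hgt
    · have hx' := Option.some.inj hx
      have hgt' : arr.getD j.toNat 0 > arr.getD i.toNat 0 := by
        rw [← Int.toNat_of_nonneg hi0, ← Int.toNat_of_nonneg hj0,
          PySem.List.pyGetD_natCast, PySem.List.pyGetD_natCast] at hgt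
        exact hgt
      exact ⟨i.toNat, j.toNat, by omega, by omega, hgt', by omega⟩
  · rintro ⟨i, j, hij, hjn, hgt, rfl⟩
    rw [List.mem_flatten]
    refine ⟨_, List.mem_map.mpr ⟨(i : Int),
      PySem.List.mem_pyRange_one.mpr ⟨by omega, by omega⟩, rfl⟩, ?_⟩
    rw [List.mem_filterMap]
    refine ⟨(j : Int), PySem.List.mem_pyRange_one.mpr ⟨by omega, by omega⟩, ?_⟩
    have hgt' : PySem.List.pyGetD arr ((j : Int)) 0 > PySem.List.pyGetD arr ((i : Int)) 0 := by
      rw [PySem.List.pyGetD_natCast, PySem.List.pyGetD_natCast]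
      exact hgt
    rw [if_pos hgt']

theorem pv_check_iff (arr : List Int) (d : Nat) :
    pvCheck arr d = true ↔ ∃ i : Nat, i + d < arr.length ∧ arr.getD (i + d) 0 > arr.getD i 0 := by
  unfold pvCheck
  simp only [List.any_eq_true, List.mem_range, decide_eq_true_eq]
  constructor
  · rintro ⟨i, hi, h⟩; exact ⟨i, by omega, h⟩
  · rintro ⟨i, hi, h⟩; exact ⟨i, by omega, h⟩

-- check d ↔ a valid pair with gap d exists (for d ≥ 1)
theorem pv_check_pair (arr : List Int) (d : Nat) (hd : 1 ≤ d) :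
    pvCheck arr d = true ↔ ∃ i j : Nat, i < j ∧ j < arr.length ∧
      arr.getD j 0 > arr.getD i 0 ∧ j - i = d := by
  rw [pv_check_iff]
  constructor
  · rintro ⟨i, hin, h⟩; exact ⟨i, i + d, by omega, hin, h, by omega⟩
  · rintro ⟨i, j, hij, hjn, h, rfl⟩
    exact ⟨i, by omega, by rwa [Nat.add_sub_cancel' (le_of_lt hij)]⟩

theorem pv_goB_char (arr : List Int) : ∀ d : Nat,
    (pvGoB arr d = -1234232123 ∧ ∀ k, 1 ≤ k → k ≤ d → pvCheck arr k = false)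
    ∨ (∃ k, 1 ≤ k ∧ k ≤ d ∧ pvCheck arr k = true ∧ pvGoB arr d = (k : Int) ∧
        ∀ m, k < m → m ≤ d → pvCheck arr m = false) := by
  intro d
  induction d with
  | zero => left; exact ⟨rfl, by omega⟩
  | succ d ih =>
    by_cases hc : pvCheck arr (d + 1) = true
    · right
      exact ⟨d + 1, by omega, le_refl _, hc, by simp [pvGoB, hc], by omega⟩
    · have hgo : pvGoB arr (d + 1) = pvGoB arr d := by simp [pvGoB, hc]
      rcases ih with ⟨he, hall⟩ | ⟨k, hk1, hkd, hck, he, hmax⟩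
      · left
        refine ⟨hgo ▸ he, fun k h1 h2 => ?_⟩
        rcases Nat.lt_or_ge k (d + 1) with h | h
        · exact hall k h1 (by omega)
        · have : k = d + 1 := by omega
          subst this; simpa using hc
      · right
        refine ⟨k, hk1, by omega, hck, hgo ▸ he, fun m h1 h2 => ?_⟩
        rcases Nat.lt_or_ge m (d + 1) with h | h
        · exact hmax m h1 (by omega)
        · have : m = d + 1 := by omega
          subst this; simpa using hc

-- ===== VERDICT (by name: the statement is the Claim_ definition above) =====
theorem find_max_sum_difference_spec : Claim_equal_find_max_sum_difference := by
  intro arr _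
  unfold Spec_find_max_sum_difference find_max_sum_difference_alt
  rw [pv_A_eq]
  rcases pv_goB_char arr (arr.length - 1) with ⟨he, hall⟩ | ⟨k, hk1, hkd, hck, he, hmax⟩
  · -- no gap checks out: both sides return the sentinel
    rw [he]
    rcases pv_foldl_max_cases (pvML arr) (-1234232123) with h | h
    · exact h
    · exfalso
      rcases (pv_mem_ML arr _).mp h with ⟨i, j, hij, hjn, hgt, _⟩
      have hc := (pv_check_pair arr (j - i) (by omega)).mpr ⟨i, j, hij, hjn, hgt, rfl⟩
      rw [hall (j - i) (by omega) (by omega)] at hc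
      exact Bool.noConfusion hc
  · -- greatest feasible gap k: A's max over pairs equals k
    rw [he]
    rcases (pv_check_pair arr k hk1).mp hck with ⟨i, j, hij, hjn, hgt, hji⟩
    have hmem : ((j : Int) - (i : Int)) ∈ pvML arr :=
      (pv_mem_ML arr _).mpr ⟨i, j, hij, hjn, hgt, rfl⟩
    have hle : ((j : Int) - (i : Int)) ≤ (pvML arr).foldl max (-1234232123) :=
      pv_mem_le_foldl_max _ _ _ hmem
    have hgtlo : (1 : Int) ≤ (pvML arr).foldl max (-1234232123) := by
      have : (1 : Int) ≤ (j : Int) - (i : Int) := by omega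
      omega
    rcases pv_foldl_max_cases (pvML arr) (-1234232123) with h | h
    · omega
    · rcases (pv_mem_ML arr _).mp h with ⟨i', j', hij', hjn', hgt', hval⟩
      have hck' : pvCheck arr (j' - i') = true :=
        (pv_check_pair arr (j' - i') (by omega)).mpr ⟨i', j', hij', hjn', hgt', rfl⟩
      have hle' : j' - i' ≤ k := by
        by_contra hlt
        have hm := hmax (j' - i') (by omega) (by omega)
        rw [hck'] at hm
        exact Bool.noConfusion hm
      omega
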